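-- pv_equiv track=rewrite | github.com/101rror/GeeksforGeeks | Difficulty: Easy/Largest number in one swap/largest-number-in-one-swap.py | largestSwap
-- ===== SOURCE A (Python) =====
-- def largestSwap(s):
--     n = len(s)
--     arr = sorted(s, key = lambda e: -ord(e))
--     for i in range(n):
--         if s[i] < arr[i]:
--             break
--     else:
--         return s
--
--     j = s.rfind(arr[i])
--     arr = list(s)
--     arr[i], arr[j] = arr[j], arr[i]
--
--     return "".join(arr)
-- ===== SOURCE B (Python) =====
-- def largestSwap(s):
--     # One right-to-left pass: track the rightmost maximum of the suffix seen so far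
--     # (index `best`, char `bestc`); whenever the current char is beaten by it, record
--     # the swap. The last recorded swap (leftmost such position) is the best single swap.
--     best = -1
--     bestc = None
--     swap = None
--     i = len(s)
--     for c in reversed(s):
--         i -= 1
--         if best < 0 or c > bestc:
--             best = i
--             bestc = c
--         elif c < bestc:
--             swap = (i, best)
--     if swap is None:
--         return s
--     i, j = swap
--     lst = list(s)
--     lst[i], lst[j] = lst[j], lst[i]
--     return "".join(lst)
-- ===== Notes on version B (the rewrite author's own statement) =====
-- stated objective: faster
-- what changed: Replaced sort-and-compare (sort chars descending, find first mismatch, rfind the target char) by a single right-to-left pass that tracks the rightmost suffix-maximum index and records the leftmost position beaten by it.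
import Mathlib
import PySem

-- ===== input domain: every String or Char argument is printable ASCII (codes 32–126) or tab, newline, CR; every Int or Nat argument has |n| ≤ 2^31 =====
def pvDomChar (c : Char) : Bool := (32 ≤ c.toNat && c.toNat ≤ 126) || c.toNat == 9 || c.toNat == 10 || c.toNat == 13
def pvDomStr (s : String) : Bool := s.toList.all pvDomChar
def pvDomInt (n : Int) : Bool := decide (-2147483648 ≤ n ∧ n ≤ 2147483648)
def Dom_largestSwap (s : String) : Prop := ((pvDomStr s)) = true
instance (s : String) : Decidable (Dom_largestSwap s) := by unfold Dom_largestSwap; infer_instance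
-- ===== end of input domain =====

-- B replaces A's sort-and-compare (sort descending, first mismatch, rfind) by one
-- right-to-left pass tracking the rightmost suffix maximum (objective: faster, O(n log n) → O(n)).

-- ===== PORT A =====
-- the for/else loop "for i in range(n): if s[i] < arr[i]: break / else: return s":
-- returns the first index i with s[i] < arr[i] together with arr[i]; none = the else branch
def pvAFind : List Char → List Char → Nat → Option (Nat × Char)
  | c :: cs, a :: as, i => if c < a then some (i, a) else pvAFind cs as (i + 1)
  | _, _, _ => none

def largestSwap (s : String) : String :=
  let l := s.toList
  -- arr = sorted(s, key = lambda e: -ord(e))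
  let arr := PySem.List.sorted l (fun e => -(e.toNat : Int)) false
  match pvAFind l arr 0 with
  | none => s
  | some (i, ai) =>
    -- j = s.rfind(arr[i])
    let j : Int := PySem.Chars.rfind l [ai]
    -- arr = list(s); arr[i], arr[j] = arr[j], arr[i]; "".join(arr)
    let t1 := PySem.List.pyGetD l j ' '
    let t2 := PySem.List.pyGetD l (i : Int) ' '
    String.ofList (PySem.List.pySetD (PySem.List.pySetD l (i : Int) t1) j t2)

-- ===== PORT B =====
-- Source B's right-to-left index loop as the obvious structural recursion over the list
-- (suffix first); the loop indices are relative to the current suffix, shifted at each cons.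
-- state = (best: index+char of the rightmost maximum of the suffix, swap: last recorded (i, best))
def pvBScan : List Char → Option (Nat × Char) × Option (Nat × Nat)
  | [] => (none, none)
  | c :: rest =>
    match pvBScan rest with
    | (none, sw) => (some (0, c), sw.map (fun p => (p.1 + 1, p.2 + 1)))
    | (some (k, b), sw) =>
      if b < c then (some (0, c), sw.map (fun p => (p.1 + 1, p.2 + 1)))
      else if c < b then (some (k + 1, b), some (0, k + 1))
      else (some (k + 1, b), sw.map (fun p => (p.1 + 1, p.2 + 1)))

def largestSwap_alt (s : String) : String :=
  let l := s.toList
  match (pvBScan l).2 with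
  | none => s
  | some (i, j) =>
    -- lst = list(s); lst[i], lst[j] = lst[j], lst[i]; "".join(lst)
    let t1 := l.getD j ' '
    let t2 := l.getD i ' '
    String.ofList ((l.set i t1).set j t2)

-- ===== PRECONDITION & SPEC =====
def Spec_largestSwap (s : String) (out : String) : Prop := out = largestSwap_alt s
instance (s : String) (out : String) : Decidable (Spec_largestSwap s out) := by unfold Spec_largestSwap; infer_instance

-- ===== CLAIM (what is proved, stated in full; the proofs are below) =====
def Claim_equal_largestSwap : Prop := ∀ (s : String), Dom_largestSwap s → Spec_largestSwap s (largestSwap s)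

-- ===== LEMMAS AND PROOFS =====

def CharDesc (l : List Char) : Prop := l.Pairwise (fun a b => b ≤ a)

def IsRArgmax (l : List Char) (k : Nat) (b : Char) : Prop :=
  ∃ hk : k < l.length, l[k] = b ∧ (∀ x ∈ l, x ≤ b) ∧ (∀ m, (hm : m < l.length) → k < m → l[m] < b)

def IsSwapPair (l : List Char) (i j : Nat) : Prop :=
  ∃ (hi : i < l.length) (hj : j < l.length),
    i < j ∧ l[i] < l[j]
    ∧ (∀ m, (hm : m < l.length) → i < m → l[m] ≤ l[j])
    ∧ (∀ m, (hm : m < l.length) → j < m → l[m] < l[j])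
    ∧ (∀ p, (hp : p < l.length) → p < i → ∀ m, (hm : m < l.length) → p < m → l[m] ≤ l[p])

lemma char_le_iff (a b : Char) : a ≤ b ↔ a.toNat ≤ b.toNat := by
  rw [Char.le_def, UInt32.le_iff_toNat_le]; rfl

lemma char_toNat_inj {a b : Char} (h : a.toNat = b.toNat) : a = b := by
  unfold Char.toNat at h; exact Char.ext (UInt32.toNat_inj.mp h)

lemma desc_cons {c : Char} {rest : List Char} :
    CharDesc (c :: rest) ↔ (∀ x ∈ rest, x ≤ c) ∧ CharDesc rest := by
  simp [CharDesc, List.pairwise_cons]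

-- ===== B-side characterisation =====
lemma argmax_cons_le {c b : Char} {rest : List Char} {k : Nat}
    (h : IsRArgmax rest k b) (hcb : c ≤ b) : IsRArgmax (c :: rest) (k + 1) b := by
  obtain ⟨hk, hget, hub, hr⟩ := h
  refine ⟨by simpa using hk, by simpa using hget, ?_, ?_⟩
  · intro x hx
    rcases List.mem_cons.mp hx with rfl | hx
    · exact hcb
    · exact hub x hx
  · intro m hm hkm
    match m, hm, hkm with
    | m + 1, hm, hkm =>
      simpa using hr m (by simpa using hm) (by omega)

lemma argmax_cons_top {c : Char} {rest : List Char}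
    (hub : ∀ x ∈ rest, x < c) : IsRArgmax (c :: rest) 0 c := by
  refine ⟨by simp, by simp, ?_, ?_⟩
  · intro x hx
    rcases List.mem_cons.mp hx with rfl | hx
    · exact le_refl _
    · exact le_of_lt (hub x hx)
  · intro m hm h0m
    match m, hm, h0m with
    | m + 1, hm, _ =>
      simpa using hub (rest[m]'(by simpa using hm)) (by simp)

lemma swap_cons {c : Char} {rest : List Char} {i j : Nat}
    (h : IsSwapPair rest i j) (hc : ∀ x ∈ rest, x ≤ c) :
    IsSwapPair (c :: rest) (i + 1) (j + 1) := by
  obtain ⟨hi, hj, hij, hlt, hub, hr, hmin⟩ := h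
  refine ⟨by simpa using hi, by simpa using hj, by omega, by simpa using hlt, ?_, ?_, ?_⟩
  · intro m hm him
    match m, hm, him with
    | m + 1, hm, him => simpa using hub m (by simpa using hm) (by omega)
  · intro m hm hjm
    match m, hm, hjm with
    | m + 1, hm, hjm => simpa using hr m (by simpa using hm) (by omega)
  · intro p hp hpi m hm hpm
    match p, m, hm, hpm with
    | 0, m + 1, hm, _ =>
      simpa using hc (rest[m]'(by simpa using hm)) (by simp)
    | p + 1, m + 1, hm, hpm =>
      simpa using hmin p (by simpa using hp) (by omega) m (by simpa using hm) (by omega)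

lemma swap_cons_new {c b : Char} {rest : List Char} {k : Nat}
    (h : IsRArgmax rest k b) (hcb : c < b) : IsSwapPair (c :: rest) 0 (k + 1) := by
  obtain ⟨hk, hget, hub, hr⟩ := h
  refine ⟨by simp, by simpa using hk, by omega, by simpa [hget] using hcb, ?_, ?_, ?_⟩
  · intro m hm h0m
    match m, hm, h0m with
    | m + 1, hm, _ => simpa [hget] using hub (rest[m]'(by simpa using hm)) (by simp)
  · intro m hm hkm
    match m, hm, hkm with
    | m + 1, hm, hkm => simpa [hget] using hr m (by simpa using hm) (by omega)
  · omega

lemma bscan_spec (l : List Char) :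
    (((pvBScan l).1 = none → l = []) ∧ (∀ k b, (pvBScan l).1 = some (k, b) → IsRArgmax l k b))
    ∧ ((pvBScan l).2 = none ↔ CharDesc l)
    ∧ (∀ i j, (pvBScan l).2 = some (i, j) → IsSwapPair l i j) := by
  induction l with
  | nil => refine ⟨⟨fun _ => rfl, ?_⟩, ?_, ?_⟩ <;> simp [pvBScan, CharDesc]
  | cons c rest ih =>
    obtain ⟨⟨hb_none, hb_some⟩, hsw_none, hsw_some⟩ := ih
    cases hbr : pvBScan rest with
    | mk best sw =>
      rw [hbr] at hb_none hb_some hsw_none hsw_some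
      simp only at hb_none hb_some hsw_none hsw_some
      cases best with
      | none =>
        have hrest : rest = [] := hb_none rfl
        subst hrest
        have hsw : sw = none := by
          have := congrArg Prod.snd hbr
          simpa [pvBScan] using this.symm
        subst hsw
        refine ⟨⟨?_, ?_⟩, ?_, ?_⟩
        · intro h; simp [pvBScan] at h
        · intro k b h
          simp [pvBScan] at h
          obtain ⟨rfl, rfl⟩ := h
          exact argmax_cons_top (by simp)
        · simp [pvBScan, CharDesc]
        · intro i j h; simp [pvBScan] at h
      | some kb =>
        obtain ⟨k, b⟩ := kb
        have hmax : IsRArgmax rest k b := hb_some k b rfl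
        have hub : ∀ x ∈ rest, x ≤ b := hmax.2.2.1
        by_cases hbc : b < c
        · refine ⟨⟨?_, ?_⟩, ?_, ?_⟩
          · intro h; simp [pvBScan, hbr, hbc] at h
          · intro k' b' h
            simp [pvBScan, hbr, hbc] at h
            obtain ⟨rfl, rfl⟩ := h
            exact argmax_cons_top (fun x hx => lt_of_le_of_lt (hub x hx) hbc)
          · have : (pvBScan (c :: rest)).2 = sw.map (fun p => (p.1 + 1, p.2 + 1)) := by
              simp [pvBScan, hbr, hbc]
            rw [this, Option.map_eq_none_iff, hsw_none, desc_cons]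
            exact ⟨fun h => ⟨fun x hx => le_of_lt (lt_of_le_of_lt (hub x hx) hbc), h⟩, fun h => h.2⟩
          · intro i j h
            simp [pvBScan, hbr, hbc] at h
            obtain ⟨i', j', hsw', rfl, rfl⟩ := h
            exact swap_cons (hsw_some i' j' hsw')
              (fun x hx => le_of_lt (lt_of_le_of_lt (hub x hx) hbc))
        · by_cases hcb : c < b
          · refine ⟨⟨?_, ?_⟩, ?_, ?_⟩
            · intro h; simp [pvBScan, hbr, hbc, hcb] at h
            · intro k' b' h
              simp [pvBScan, hbr, hbc, hcb] at h
              obtain ⟨rfl, rfl⟩ := h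
              exact argmax_cons_le hmax (le_of_lt hcb)
            · have : (pvBScan (c :: rest)).2 = some (0, k + 1) := by
                simp [pvBScan, hbr, hbc, hcb]
              rw [this]
              constructor
              · intro h; exact absurd h (by simp)
              · intro h
                exfalso
                have hbmem : b ∈ rest := hmax.2.1 ▸ List.getElem_mem hmax.1
                have := (desc_cons.mp h).1 b hbmem
                exact absurd (lt_of_lt_of_le hcb this) (lt_irrefl c)
            · intro i j h
              simp [pvBScan, hbr, hbc, hcb] at h
              obtain ⟨rfl, rfl⟩ := h
              exact swap_cons_new hmax hcb
          · have hceb : c = b := le_antisymm (not_lt.mp hbc) (not_lt.mp hcb)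
            have hubc : ∀ x ∈ rest, x ≤ c := fun x hx => hceb ▸ hub x hx
            refine ⟨⟨?_, ?_⟩, ?_, ?_⟩
            · intro h; simp [pvBScan, hbr, hbc, hcb] at h
            · intro k' b' h
              simp [pvBScan, hbr, hbc, hcb] at h
              obtain ⟨rfl, rfl⟩ := h
              exact argmax_cons_le hmax (le_of_eq hceb)
            · have : (pvBScan (c :: rest)).2 = sw.map (fun p => (p.1 + 1, p.2 + 1)) := by
                simp [pvBScan, hbr, hbc, hcb]
              rw [this, Option.map_eq_none_iff, hsw_none, desc_cons]
              exact ⟨fun h => ⟨hubc, h⟩, fun h => h.2⟩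
            · intro i j h
              simp [pvBScan, hbr, hbc, hcb] at h
              obtain ⟨i', j', hsw', rfl, rfl⟩ := h
              exact swap_cons (hsw_some i' j' hsw') hubc


lemma swap_unique {l : List Char} {i j i' j' : Nat}
    (h : IsSwapPair l i j) (h' : IsSwapPair l i' j') : i = i' ∧ j = j' := by
  obtain ⟨hi, hj, hij, hlt, hub, hr, hmin⟩ := h
  obtain ⟨hi', hj', hij', hlt', hub', hr', hmin'⟩ := h'
  have hii : i = i' := by
    rcases lt_trichotomy i i' with h1 | h1 | h1
    · exact absurd (hmin' i hi h1 j hj hij) (not_le.mpr hlt)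
    · exact h1
    · exact absurd (hmin i' hi' h1 j' hj' hij') (not_le.mpr hlt')
  subst hii
  refine ⟨rfl, ?_⟩
  rcases lt_trichotomy j j' with h1 | h1 | h1
  · exact absurd (hub' j hj hij) (not_le.mpr (hr j' hj' h1))
  · exact h1
  · exact absurd (hub j' hj' hij') (not_le.mpr (hr' j hj h1))

lemma pvAFind_none_forall : ∀ (xs ys : List Char) (n : Nat), xs.length = ys.length →
    pvAFind xs ys n = none → List.Forall₂ (fun c a => a ≤ c) xs ys := by
  intro xs
  induction xs with
  | nil =>
    intro ys n hlen _
    cases ys with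
    | nil => exact List.Forall₂.nil
    | cons a as => simp at hlen
  | cons c cs ih =>
    intro ys n hlen h
    cases ys with
    | nil => simp at hlen
    | cons a as =>
      simp only [pvAFind] at h
      split at h
      · exact absurd h (by simp)
      · exact List.Forall₂.cons (not_lt.mp (by assumption)) (ih as (n + 1) (by simpa using hlen) h)

lemma pvAFind_some_spec : ∀ (xs ys : List Char) (n i : Nat) (ai : Char),
    pvAFind xs ys n = some (i, ai) →
    ∃ d, i = n + d ∧ ∃ (h1 : d < xs.length) (h2 : d < ys.length), xs[d] < ys[d] ∧ ai = ys[d] ∧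
      ∀ k, k < d → ∀ (hk1 : k < xs.length) (hk2 : k < ys.length), ¬ xs[k] < ys[k] := by
  intro xs
  induction xs with
  | nil => intro ys n i ai h; cases ys <;> simp [pvAFind] at h
  | cons c cs ih =>
    intro ys n i ai h
    cases ys with
    | nil => simp [pvAFind] at h
    | cons a as =>
      simp only [pvAFind] at h
      split at h
      · obtain ⟨rfl, rfl⟩ := by simpa using h
        exact ⟨0, by omega, by simp, by simp, by simpa using (by assumption), by simp, by omega⟩
      · obtain ⟨d, hd, h1, h2, hlt, hai, hmin⟩ := ih as (n + 1) i ai h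
        refine ⟨d + 1, by omega, by simpa using h1, by simpa using h2, by simpa using hlt,
          by simpa using hai, ?_⟩
        intro k hk hk1 hk2
        match k with
        | 0 => simpa using (by assumption : ¬ c < a)
        | k + 1 => simpa using hmin k (by omega) (by simpa using hk1) (by simpa using hk2)

lemma forall2_sum_eq : ∀ {xs ys : List Nat}, List.Forall₂ (· ≤ ·) xs ys → ys.sum ≤ xs.sum → xs = ys := by
  intro xs ys h
  induction h with
  | nil => intro _; rfl
  | @cons a b l1 l2 hab htail ih =>
    intro hs
    have h1 : l1.sum ≤ l2.sum := List.Forall₂.sum_le_sum htail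
    simp only [List.sum_cons] at hs
    have : a = b := by omega
    subst this
    rw [ih (by omega)]

lemma sorted_desc (l : List Char) :
    CharDesc (PySem.List.sorted l (fun e => -(e.toNat : Int)) false) := by
  have h := PySem.List.sorted_pairwise (xs := l) (key := fun e => -(e.toNat : Int))
  refine h.imp ?_
  intro a b hab
  simp only at hab
  rw [char_le_iff]
  omega

lemma desc_drop_le {t : List Char} (h : CharDesc t) {k : Nat} (hk : k < t.length) :
    ∀ x ∈ t.drop k, x ≤ t[k] := by
  intro x hx
  obtain ⟨m, hm, rfl⟩ := List.mem_iff_getElem.mp hx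
  rw [List.getElem_drop]
  rcases Nat.eq_zero_or_pos m with rfl | hmpos
  · simp
  · have hlt : k < k + m := by omega
    exact (List.pairwise_iff_getElem.mp h) k (k + m) hk (by simp [List.length_drop] at hm; omega) hlt

lemma pointwise_eq_of_perm {t l : List Char} (hperm : t.Perm l)
    (hpt : List.Forall₂ (fun a c => a ≤ c) t l) : t = l := by
  have hmap : List.Forall₂ (· ≤ ·) (t.map Char.toNat) (l.map Char.toNat) := by
    rw [List.forall₂_map_right_iff, List.forall₂_map_left_iff]
    exact hpt.imp (fun _ _ hab => (char_le_iff _ _).mp hab)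
  have hsum : (l.map Char.toNat).sum ≤ (t.map Char.toNat).sum :=
    le_of_eq ((hperm.map Char.toNat).sum_eq.symm)
  have hmeq : t.map Char.toNat = l.map Char.toNat := forall2_sum_eq hmap hsum
  exact List.map_injective_iff.mpr (fun a b => char_toNat_inj) hmeq

lemma prefix_take_eq {t l : List Char} (hperm : t.Perm l) (hdesc : CharDesc t)
    {d : Nat} (hd : d ≤ l.length)
    (hpt : ∀ k, k < d → ∀ (h1 : k < l.length) (h2 : k < t.length), t[k] ≤ l[k]) :
    ∀ k, k ≤ d → t.take k = l.take k := by
  have hlen : t.length = l.length := hperm.length_eq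
  intro k
  induction k with
  | zero => intro _; simp
  | succ k ih =>
    intro hkd
    have htk : t.take k = l.take k := ih (by omega)
    have hdrop : (t.drop k).Perm (l.drop k) := by
      have h2 : (t.take k ++ t.drop k).Perm (l.take k ++ l.drop k) := by simpa using hperm
      rw [htk] at h2
      exact (List.perm_append_left_iff _).mp h2
    have hkl : k < l.length := by omega
    have hkt : k < t.length := by omega
    have h0 : 0 < (l.drop k).length := by simp [List.length_drop]; omega
    have hmem : l[k] ∈ t.drop k := by
      refine hdrop.symm.subset ?_
      have heq0 : (l.drop k)[0]'h0 = l[k] := by simp [List.getElem_drop]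
      exact heq0 ▸ List.getElem_mem h0
    have hle : l[k] ≤ t[k] := desc_drop_le hdesc hkt _ hmem
    have heq : t[k] = l[k] := le_antisymm (hpt k (by omega) hkl hkt) hle
    rw [List.take_succ_eq_append_getElem hkt, List.take_succ_eq_append_getElem hkl, htk, heq]

lemma exists_greatest_getElem {l : List Char} {c : Char} (h : c ∈ l) :
    ∃ j, ∃ hj : j < l.length, l[j] = c ∧ ∀ m, (hm : m < l.length) → j < m → l[m] ≠ c := by
  induction l with
  | nil => simp at h
  | cons c0 rest ih =>
    by_cases hmem : c ∈ rest
    · obtain ⟨j, hj, hget, hgt⟩ := ih hmem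
      refine ⟨j + 1, by simpa using hj, by simpa using hget, ?_⟩
      intro m hm hjm
      match m, hm, hjm with
      | m + 1, hm, hjm => simpa using hgt m (by simpa using hm) (by omega)
    · have hc0 : c = c0 := by
        rcases List.mem_cons.mp h with h1 | h1
        · exact h1
        · exact absurd h1 hmem
      refine ⟨0, by simp, hc0.symm, ?_⟩
      intro m hm h0m
      match m, hm, h0m with
      | m + 1, hm, _ =>
        intro hx
        exact hmem (hx ▸ List.getElem_mem (by simpa using hm))

lemma singleton_isPrefixOf_iff (c : Char) (t : List Char) :
    [c].isPrefixOf t = true ↔ ∃ r, t = c :: r := by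
  cases t with
  | nil => simp [List.isPrefixOf]
  | cons d r =>
    simp [List.isPrefixOf]
    constructor
    · intro h; exact h.symm
    · intro h; exact h.symm

lemma rfind_go_eq {l : List Char} {c : Char} {j : Nat} (hj : j < l.length) (hget : l[j] = c)
    (hgt : ∀ m, (hm : m < l.length) → j < m → l[m] ≠ c) :
    ∀ x, j ≤ x → x ≤ l.length → PySem.Chars.rfind.go l [c] x = (j : Int) := by
  intro x
  induction x with
  | zero =>
    intro hjx _
    have hj0 : j = 0 := by omega
    subst hj0
    have : l = c :: l.drop 1 := by
      have := List.drop_eq_getElem_cons hj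
      simpa [hget] using this
    simp only [PySem.Chars.rfind.go]
    rw [(singleton_isPrefixOf_iff c l).mpr ⟨_, this⟩]
    simp
  | succ x ih =>
    intro hjx hxl
    simp only [PySem.Chars.rfind.go]
    by_cases hxe : j = x + 1
    · subst hxe
      have : l.drop (x + 1) = c :: l.drop (x + 2) := by
        have := List.drop_eq_getElem_cons hj
        simpa [hget] using this
      rw [(singleton_isPrefixOf_iff c _).mpr ⟨_, this⟩]
      simp
    · have hnp : [c].isPrefixOf (l.drop (x + 1)) = false := by
        rcases Nat.lt_or_ge (x + 1) l.length with hlt | hge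
        · have hne : l[x + 1] ≠ c := hgt (x + 1) hlt (by omega)
          rw [Bool.eq_false_iff]
          intro hp
          obtain ⟨r, hr⟩ := (singleton_isPrefixOf_iff c _).mp hp
          have := List.drop_eq_getElem_cons hlt
          rw [hr] at this
          exact hne (List.head_eq_of_cons_eq this.symm)
        · have : l.drop (x + 1) = [] := List.drop_eq_nil_of_le hge
          simp [this]
      rw [hnp]
      simp only [Bool.false_eq_true, if_false]
      exact ih (by omega) (by omega)

lemma rfind_singleton_eq {l : List Char} {c : Char} {j : Nat} (hj : j < l.length) (hget : l[j] = c)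
    (hgt : ∀ m, (hm : m < l.length) → j < m → l[m] ≠ c) :
    PySem.Chars.rfind l [c] = (j : Int) := by
  unfold PySem.Chars.rfind
  exact rfind_go_eq hj hget hgt l.length (by omega) (le_refl _)

lemma drop_perm_of_take_eq {t l : List Char} (hperm : t.Perm l) {k : Nat}
    (h : t.take k = l.take k) : (t.drop k).Perm (l.drop k) := by
  have h2 : (t.take k ++ t.drop k).Perm (l.take k ++ l.drop k) := by simpa using hperm
  rw [h] at h2
  exact (List.perm_append_left_iff _).mp h2

lemma mem_drop_of_index {l : List Char} {p m : Nat} (hm : m < l.length) (hpm : p ≤ m) :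
    l[m] ∈ l.drop p := by
  have h0 : m - p < (l.drop p).length := by simp [List.length_drop]; omega
  have : (l.drop p)[m - p]'h0 = l[m] := by rw [List.getElem_drop]; congr 1; omega
  exact this ▸ List.getElem_mem h0

lemma aFind_none_desc {l : List Char}
    (h : pvAFind l (PySem.List.sorted l (fun e => -(e.toNat : Int)) false) 0 = none) :
    CharDesc l := by
  have hperm : (PySem.List.sorted l (fun e => -(e.toNat : Int)) false).Perm l :=
    PySem.List.sorted_perm l _ _
  have hf := pvAFind_none_forall l _ 0 hperm.length_eq.symm h
  have heq : PySem.List.sorted l (fun e => -(e.toNat : Int)) false = l :=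
    pointwise_eq_of_perm hperm hf.flip
  have := sorted_desc l
  rwa [heq] at this

lemma aFind_swapPair {l : List Char} {d : Nat} {ai : Char}
    (h : pvAFind l (PySem.List.sorted l (fun e => -(e.toNat : Int)) false) 0 = some (d, ai)) :
    ∃ jn : Nat, PySem.Chars.rfind l [ai] = (jn : Int) ∧ IsSwapPair l d jn ∧
      ∃ hjn : jn < l.length, l[jn] = ai := by
  have hperm : (PySem.List.sorted l (fun e => -(e.toNat : Int)) false).Perm l :=
    PySem.List.sorted_perm l _ _
  have hdesc := sorted_desc l
  have hlen := hperm.length_eq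
  obtain ⟨d', hd0, h1, h2, hlt, hai, hmin⟩ := pvAFind_some_spec l _ 0 d ai h
  have hdd : d = d' := by omega
  subst hdd
  have hpt : ∀ k, k < d → ∀ (hk1 : k < l.length)
      (hk2 : k < (PySem.List.sorted l (fun e => -(e.toNat : Int)) false).length),
      (PySem.List.sorted l (fun e => -(e.toNat : Int)) false)[k] ≤ l[k] :=
    fun k hk hk1 hk2 => not_lt.mp (hmin k hk hk1 hk2)
  have htake := prefix_take_eq hperm hdesc (d := d) (by omega) hpt
  have hdropperm := drop_perm_of_take_eq hperm (htake d le_rfl)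
  have hub : ∀ x ∈ l.drop d, x ≤ ai := by
    intro x hx
    rw [hai]
    exact desc_drop_le hdesc h2 x (hdropperm.symm.subset hx)
  have hmem_ai : ai ∈ l.drop d := by
    rw [hai]
    exact hdropperm.subset (mem_drop_of_index h2 le_rfl)
  have hmem_l : ai ∈ l := List.mem_of_mem_drop hmem_ai
  obtain ⟨jn, hjn, hget, hgt⟩ := exists_greatest_getElem hmem_l
  have hrfind := rfind_singleton_eq hjn hget hgt
  have hldai : l[d] < ai := hai ▸ hlt
  obtain ⟨m', hm', hm'get⟩ := List.mem_iff_getElem.mp hmem_ai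
  rw [List.getElem_drop] at hm'get
  have hm'len : d + m' < l.length := by simp [List.length_drop] at hm'; omega
  have hm'pos : 0 < m' := by
    rcases Nat.eq_zero_or_pos m' with rfl | h'
    · exact absurd (by simpa using hm'get) (ne_of_lt hldai)
    · exact h'
  have hdjn : d < jn := by
    by_contra hc
    exact hgt (d + m') hm'len (by omega) hm'get
  have hsp : IsSwapPair l d jn := by
    refine ⟨h1, hjn, hdjn, by rw [hget]; exact hldai, ?_, ?_, ?_⟩
    · intro m hm hdm
      rw [hget]
      exact hub _ (mem_drop_of_index hm (by omega))
    · intro m hm hjm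
      rw [hget]
      exact lt_of_le_of_ne (hub _ (mem_drop_of_index hm (by omega))) (hgt m hm hjm)
    · intro p hp hpd m hm hpm
      have hpt' : p < (PySem.List.sorted l (fun e => -(e.toNat : Int)) false).length := by omega
      have e1 := htake p (by omega)
      have e2 := htake (p + 1) (by omega)
      rw [List.take_succ_eq_append_getElem hpt', List.take_succ_eq_append_getElem hp, e1,
        List.append_cancel_left_eq] at e2
      have hpe : (PySem.List.sorted l (fun e => -(e.toNat : Int)) false)[p] = l[p] := by
        simpa using e2
      have dp := drop_perm_of_take_eq hperm e1
      have : l[m] ∈ (PySem.List.sorted l (fun e => -(e.toNat : Int)) false).drop p :=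
        dp.symm.subset (mem_drop_of_index hm (by omega))
      have := desc_drop_le hdesc hpt' _ this
      rwa [hpe] at this
  exact ⟨jn, hrfind, hsp, hjn, hget⟩

theorem largestSwap_eq (s : String) : largestSwap s = largestSwap_alt s := by
  unfold largestSwap largestSwap_alt
  cases hA : pvAFind s.toList (PySem.List.sorted s.toList (fun e => -(e.toNat : Int)) false) 0 with
  | none =>
    have hdesc : CharDesc s.toList := aFind_none_desc hA
    have hB : (pvBScan s.toList).2 = none := ((bscan_spec s.toList).2.1).mpr hdesc
    simp [hA, hB]
  | some p =>
    obtain ⟨d, ai⟩ := p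
    obtain ⟨jn, hrf, hsp, hjn, hgetai⟩ := aFind_swapPair hA
    cases hB : (pvBScan s.toList).2 with
    | none =>
      exfalso
      have hdesc : CharDesc s.toList := ((bscan_spec s.toList).2.1).mp hB
      obtain ⟨hi, hj, hij, hlt, _⟩ := hsp
      exact absurd ((List.pairwise_iff_getElem.mp hdesc) d jn hi hj hij) (not_le.mpr hlt)
    | some q =>
      obtain ⟨i, j⟩ := q
      have hsp' : IsSwapPair s.toList i j := (bscan_spec s.toList).2.2 i j hB
      obtain ⟨hdi, hdj⟩ := swap_unique hsp' hsp
      subst hdi; subst hdj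
      obtain ⟨hi, _⟩ := hsp
      simp only [hA, hB, hrf]
      simp [PySem.List.pySetD_natCast, PySem.List.pyGetD_natCast]

-- ===== VERDICT (by name: the statement is the Claim_ definition above) =====
theorem largestSwap_spec : Claim_equal_largestSwap := by
  intro s _
  unfold Spec_largestSwap
  exact largestSwap_eq s
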